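-- pv_equiv track=rewrite | github.com/linhdvu14/cp-sols | sols/CodeForces/2121_d3/C_Those_Who_Are_With_Us.py | solve
-- ===== SOURCE A (Python) =====
-- def solve(R, C, grid):
--     mx = mxr = mxc = 0
--     for r in range(R):
--         for c in range(C):
--             if grid[r][c] > mx:
--                 mx, mxr, mxc = grid[r][c], r, c
--
--     cand_c = None
--     ok = True
--     for r in range(R):
--         for c in range(C):
--             if grid[r][c] != mx: continue
--             if r == mxr: continue
--             if cand_c is not None and cand_c != c: ok = False
--             cand_c = c
--     if ok: return mx - 1
--
--     cand_r = None
--     ok = True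
--     for r in range(R):
--         for c in range(C):
--             if grid[r][c] != mx: continue
--             if c == mxc: continue
--             if cand_r is not None and cand_r != r: ok = False
--             cand_r = r
--     if ok: return mx - 1
--
--     return mx
-- ===== SOURCE B (Python) =====
-- def solve(R, C, grid):
--     # One scan: track the running max (same 0-init, strict '>', first position)
--     # and collect every cell equal to it; then answer from that index alone.
--     mx, mxr, mxc = 0, 0, 0
--     maxcells = []
--     for r in range(R):
--         for c in range(C):
--             v = grid[r][c]
--             if v > mx:
--                 mx, mxr, mxc = v, r, c
--                 maxcells = [(r, c)]
--             elif v == mx: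
--                 maxcells.append((r, c))
--     cols = {c for (r, c) in maxcells if r != mxr}
--     if len(cols) <= 1:
--         return mx - 1
--     rows = {r for (r, c) in maxcells if c != mxc}
--     if len(rows) <= 1:
--         return mx - 1
--     return mx
-- ===== Notes on version B (the rewrite author's own statement) =====
-- stated objective: simpler
-- what changed: One single scan builds an index of all maximum-valued cells; the answer is then read off that small index via two set sizes, instead of A's two further full-grid scans with candidate/flag tracking.
import Mathlib
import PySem

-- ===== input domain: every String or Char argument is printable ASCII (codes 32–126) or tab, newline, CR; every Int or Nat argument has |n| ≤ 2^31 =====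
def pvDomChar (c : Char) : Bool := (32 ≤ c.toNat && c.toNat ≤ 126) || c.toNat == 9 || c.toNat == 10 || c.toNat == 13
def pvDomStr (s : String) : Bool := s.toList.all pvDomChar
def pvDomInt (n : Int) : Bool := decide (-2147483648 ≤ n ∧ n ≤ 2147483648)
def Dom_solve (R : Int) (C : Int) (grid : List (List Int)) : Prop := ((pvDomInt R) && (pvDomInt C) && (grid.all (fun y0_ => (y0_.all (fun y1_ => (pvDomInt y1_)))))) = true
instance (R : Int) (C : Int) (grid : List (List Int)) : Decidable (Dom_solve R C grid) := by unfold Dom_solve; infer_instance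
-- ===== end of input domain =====

-- B replaces A's three full-grid scans by one scan that indexes all maximum cells,
-- then answers from two set sizes over that index (objective: simpler).

-- grid[r][c], total form: Pre_solve guarantees every index the loops reach is in range,
-- where pyGet? returns some and the default is never used (exact there).
def pvCellAt (grid : List (List Int)) (r : Int) (c : Int) : Int :=
  (((PySem.List.pyGet? grid r).bind (fun row => PySem.List.pyGet? row c)).getD 0)

-- ===== PORT A =====
def solve (R : Int) (C : Int) (grid : List (List Int)) : Int :=
  -- loop 1: mx = mxr = mxc = 0; strict '>' keeps the first maximum position
  let m : Int × Int × Int :=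
    (PySem.List.pyRange 0 R 1).foldl (fun st r =>
      (PySem.List.pyRange 0 C 1).foldl (fun (st : Int × Int × Int) c =>
        if pvCellAt grid r c > st.1 then (pvCellAt grid r c, r, c) else st) st) (0, 0, 0)
  -- loop 2: cand_c = None; ok = True  (state (cand_c, ok); 'continue's as nested ifs)
  let s2 : Option Int × Bool :=
    (PySem.List.pyRange 0 R 1).foldl (fun st r =>
      (PySem.List.pyRange 0 C 1).foldl (fun (st : Option Int × Bool) c =>
        if pvCellAt grid r c ≠ m.1 then st
        else if r = m.2.1 then st
        else (some c, if st.1.isSome ∧ st.1 ≠ some c then false else st.2)) st) (none, true)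
  if s2.2 then m.1 - 1 else
  -- loop 3: cand_r = None; ok = True
  let s3 : Option Int × Bool :=
    (PySem.List.pyRange 0 R 1).foldl (fun st r =>
      (PySem.List.pyRange 0 C 1).foldl (fun (st : Option Int × Bool) c =>
        if pvCellAt grid r c ≠ m.1 then st
        else if c = m.2.2 then st
        else (some r, if st.1.isSome ∧ st.1 ≠ some r then false else st.2)) st) (none, true)
  if s3.2 then m.1 - 1 else m.1

-- ===== PORT B =====
def solve_alt (R : Int) (C : Int) (grid : List (List Int)) : Int :=
  -- one scan: running max (same init/strict '>') plus the list of cells equal to it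
  let st : Int × Int × Int × List (Int × Int) :=
    (PySem.List.pyRange 0 R 1).foldl (fun st r =>
      (PySem.List.pyRange 0 C 1).foldl (fun (st : Int × Int × Int × List (Int × Int)) c =>
        let v := pvCellAt grid r c
        if v > st.1 then (v, r, c, [(r, c)])
        else if v = st.1 then (st.1, st.2.1, st.2.2.1, st.2.2.2 ++ [(r, c)])
        else st) st) (0, 0, 0, [])
  let cols : PySem.Set Int :=
    PySem.Set.ofList ((st.2.2.2.filter (fun p => p.1 ≠ st.2.1)).map (fun p => p.2))
  if cols.length ≤ 1 then st.1 - 1 else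
  let rows : PySem.Set Int :=
    PySem.Set.ofList ((st.2.2.2.filter (fun p => p.2 ≠ st.2.2.1)).map (fun p => p.1))
  if rows.length ≤ 1 then st.1 - 1 else st.1

-- ===== PRECONDITION & SPEC =====
-- A raises IndexError iff some visited grid[r] (r < R, only reached when C > 0) or
-- grid[r][c] (c < C) is out of range; Pre_ admits exactly the inputs where A returns.
def Pre_solve (R : Int) (C : Int) (grid : List (List Int)) : Prop :=
  0 < C → 0 < R → (R ≤ (grid.length : Int) ∧ ∀ row ∈ grid.take R.toNat, C ≤ (row.length : Int))
instance (R : Int) (C : Int) (grid : List (List Int)) : Decidable (Pre_solve R C grid) := by unfold Pre_solve; infer_instance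

def pvWitness_solve : Int × Int × List (List Int) := (2, 3, [[1, 5, 2], [5, 0, 5]])

def Spec_solve (R : Int) (C : Int) (grid : List (List Int)) (out : Int) : Prop := out = solve_alt R C grid
instance (R : Int) (C : Int) (grid : List (List Int)) (out : Int) : Decidable (Spec_solve R C grid out) := by unfold Spec_solve; infer_instance

-- ===== CLAIM (what is proved, stated in full; the proofs are below) =====
def Claim_equal_solve : Prop := ∀ (R : Int) (C : Int) (grid : List (List Int)), Dom_solve R C grid → Pre_solve R C grid → Spec_solve R C grid (solve R C grid)

-- ===== LEMMAS AND PROOFS =====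

-- value of a cell given as a pair
def pvVal (g : List (List Int)) (p : Int × Int) : Int := pvCellAt g p.1 p.2

-- the full list of (r, c) cells both programs traverse, in traversal order
def pvCells (R C : Int) : List (Int × Int) :=
  (PySem.List.pyRange 0 R 1).flatMap (fun r => (PySem.List.pyRange 0 C 1).map (fun c => (r, c)))

-- A's loop-1 step / B's scan step, on pairs
def pvStepA (g : List (List Int)) (st : Int × Int × Int) (p : Int × Int) : Int × Int × Int :=
  if pvVal g p > st.1 then (pvVal g p, p.1, p.2) else st

def pvStepB (g : List (List Int)) (st : Int × Int × Int × List (Int × Int)) (p : Int × Int) :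
    Int × Int × Int × List (Int × Int) :=
  if pvVal g p > st.1 then (pvVal g p, p.1, p.2, [p])
  else if pvVal g p = st.1 then (st.1, st.2.1, st.2.2.1, st.2.2.2 ++ [p])
  else st

-- A's loop-2/3 candidate-and-flag update (on the relevant coordinate only)
def pvUpd (st : Option Int × Bool) (x : Int) : Option Int × Bool :=
  (some x, if st.1.isSome ∧ st.1 ≠ some x then false else st.2)

-- nested fold = fold over the flattened cell list
theorem pv_foldl_nested {α β γ : Type} (f : β → List γ) (step : α → γ → α)
    (l : List β) (init : α) :
    l.foldl (fun a x => (f x).foldl step a) init = (l.flatMap f).foldl step init := by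
  induction l generalizing init with
  | nil => rfl
  | cons x t ih => simp [List.flatMap_cons, List.foldl_append, ih]

theorem pvStepA_mono (g : List (List Int)) (l : List (Int × Int)) (st : Int × Int × Int) :
    st.1 ≤ (l.foldl (pvStepA g) st).1 := by
  induction l generalizing st with
  | nil => simp
  | cons p t ih =>
    refine le_trans ?_ (ih (pvStepA g st p))
    unfold pvStepA; split
    · simp; omega
    · simp

theorem pvStepB_rel (g : List (List Int)) (l : List (Int × Int)) :
    ∀ (m r c : Int) (L : List (Int × Int)), (∀ p ∈ L, pvVal g p = m) →
    l.foldl (pvStepB g) (m, r, c, L) =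
      ((l.foldl (pvStepA g) (m, r, c)).1, (l.foldl (pvStepA g) (m, r, c)).2.1,
       (l.foldl (pvStepA g) (m, r, c)).2.2,
       L.filter (fun p => pvVal g p = (l.foldl (pvStepA g) (m, r, c)).1) ++
       l.filter (fun p => pvVal g p = (l.foldl (pvStepA g) (m, r, c)).1)) := by
  induction l with
  | nil =>
    intro m r c L hL
    simp only [List.foldl_nil, List.filter_nil, List.append_nil]
    rw [List.filter_eq_self.2 (by intro p hp; simpa using hL p hp)]
  | cons p t ih =>
    intro m r c L hL
    have hmono := pvStepA_mono g t (pvStepA g (m, r, c) p)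
    simp only [List.foldl_cons]
    by_cases h1 : pvVal g p > m
    · have hA : pvStepA g (m, r, c) p = (pvVal g p, p.1, p.2) := by simp [pvStepA, h1]
      have hB : pvStepB g (m, r, c, L) p = (pvVal g p, p.1, p.2, [p]) := by simp [pvStepB, h1]
      simp only [hA, hB] at hmono ⊢
      rw [ih (pvVal g p) p.1 p.2 [p] (by simp)]
      have hLnil : L.filter (fun q => decide (pvVal g q = (t.foldl (pvStepA g) (pvVal g p, p.1, p.2)).1)) = [] := by
        refine List.filter_eq_nil_iff.2 (fun q hq => ?_)
        have := hL q hq; simp only [decide_eq_true_eq]; omega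
      simp only [hLnil, List.nil_append, List.filter_cons]
      rcases eq_or_ne (pvVal g p) ((t.foldl (pvStepA g) (pvVal g p, p.1, p.2)).1) with he | he
      · simp [← he]
      · simp [he]
    · by_cases h2 : pvVal g p = m
      · have hA : pvStepA g (m, r, c) p = (m, r, c) := by simp [pvStepA, h1]
        have hB : pvStepB g (m, r, c, L) p = (m, r, c, L ++ [p]) := by simp [pvStepB, h2]
        have hL' : ∀ q ∈ L ++ [p], pvVal g q = m := by
          intro q hq
          rcases List.mem_append.1 hq with h | h
          · exact hL q h
          · rw [List.mem_singleton.1 h]; exact h2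
        simp only [hA, hB] at hmono ⊢
        rw [ih m r c (L ++ [p]) hL']
        simp only [List.filter_append, List.filter_cons, List.filter_nil]
        rcases eq_or_ne (pvVal g p) ((t.foldl (pvStepA g) (m, r, c)).1) with he | he
        · simp [he]
        · simp [he]
      · have h3 : pvVal g p < m := by omega
        have hA : pvStepA g (m, r, c) p = (m, r, c) := by simp [pvStepA, h1]
        have hB : pvStepB g (m, r, c, L) p = (m, r, c, L) := by simp [pvStepB, h1, h2]
        simp only [hA, hB] at hmono ⊢
        rw [ih m r c L hL]
        have he : pvVal g p ≠ ((t.foldl (pvStepA g) (m, r, c)).1) := by omega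
        simp [he]

-- ok stays false
theorem pvUpd_false (l : List Int) (o : Option Int) :
    (l.foldl pvUpd (o, false)).2 = false := by
  induction l generalizing o with
  | nil => rfl
  | cons x t ih => simpa [pvUpd] using ih (some x)

theorem pvUpd_some (l : List Int) (x : Int) :
    (l.foldl pvUpd (some x, true)).2 = true ↔ ∀ y ∈ l, y = x := by
  induction l generalizing x with
  | nil => simp
  | cons y t ih =>
    rcases eq_or_ne y x with h | h
    · subst h; simpa [pvUpd] using ih y
    · simp only [List.foldl_cons, pvUpd]
      have hif : (if (some x).isSome ∧ some x ≠ some y then false else true) = false := by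
        simp [Ne.symm h]
      rw [hif, pvUpd_false]
      simp [h]

-- a Nodup list has length ≤ 1 iff all its elements coincide
theorem pv_nodup_len (S : List Int) (h : S.Nodup) :
    S.length ≤ 1 ↔ ∀ a ∈ S, ∀ b ∈ S, a = b := by
  match S with
  | [] => simp
  | [x] => simp
  | a :: b :: t =>
    have hab : a ≠ b := by simp [List.nodup_cons] at h; tauto
    constructor
    · intro hlen; simp at hlen
    · intro hall; exact absurd (hall a (by simp) b (by simp)) hab

-- the candidate/flag fold succeeds iff the values form a set of size ≤ 1
theorem pv_ok_iff_set (l : List Int) :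
    ((l.foldl pvUpd (none, true)).2 = true) ↔ (PySem.Set.ofList l).length ≤ 1 := by
  cases l with
  | nil => simp [PySem.Set.ofList]
  | cons x t =>
    have hstep : pvUpd (none, true) x = (some x, true) := by simp [pvUpd]
    rw [List.foldl_cons, hstep, pvUpd_some,
        pv_nodup_len _ (PySem.Set.nodup_ofList (x :: t))]
    constructor
    · intro h a ha b hb
      rw [PySem.Set.mem_ofList] at ha hb
      have ea : a = x := by
        rcases List.mem_cons.1 ha with h' | h'
        · exact h'
        · exact h a h'
      have eb : b = x := by
        rcases List.mem_cons.1 hb with h' | h'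
        · exact h'
        · exact h b h'
      rw [ea, eb]
    · intro h y hy
      exact h y ((PySem.Set.mem_ofList _ _).2 (by simp [hy])) x
        ((PySem.Set.mem_ofList _ _).2 (by simp))

-- A's skip-based loop 2/3 = pvUpd-fold over the filtered coordinates
theorem pv_skipfold (g : List (List Int)) (cs : List (Int × Int)) (mx : Int)
    (q : Int × Int → Int) (sk : Int × Int → Int) (av : Int) (init : Option Int × Bool) :
    cs.foldl (fun st p =>
        if pvVal g p ≠ mx then st
        else if sk p = av then st
        else (some (q p), if st.1.isSome ∧ st.1 ≠ some (q p) then false else st.2)) init =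
    ((cs.filter (fun p => decide (pvVal g p = mx ∧ sk p ≠ av))).map q).foldl pvUpd init := by
  rw [List.foldl_map]
  rw [← PySem.List.foldl_ite_eq_foldl_filter (fun p => pvVal g p = mx ∧ sk p ≠ av)
        (fun st p => pvUpd st (q p)) cs init]
  refine List.foldl_ext _ _ init (fun st p _ => ?_)
  unfold pvUpd
  by_cases h1 : pvVal g p = mx
  · by_cases h2 : sk p = av <;> simp [h1, h2]
  · simp [h1]

-- filtering the max-cell list: the combined filter is a filter of the max-cell index
theorem pv_filter_comp (g : List (List Int)) (cs : List (Int × Int)) (mx : Int)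
    (sk : Int × Int → Int) (av : Int) :
    cs.filter (fun p => decide (pvVal g p = mx ∧ sk p ≠ av)) =
    (cs.filter (fun p => decide (pvVal g p = mx))).filter (fun p => decide (sk p ≠ av)) := by
  rw [List.filter_filter]
  refine List.filter_congr (fun p _ => ?_)
  by_cases h1 : pvVal g p = mx <;> by_cases h2 : sk p = av <;> simp [h1, h2]

-- the main equality
theorem pv_solve_eq (R C : Int) (grid : List (List Int)) :
    solve R C grid = solve_alt R C grid := by
  have hnest : ∀ {α : Type} (step : α → Int × Int → α) (init : α),
      (PySem.List.pyRange 0 R 1).foldl (fun st r =>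
        (PySem.List.pyRange 0 C 1).foldl (fun st c => step st (r, c)) st) init =
      (pvCells R C).foldl step init := by
    intro α step init
    rw [pvCells, ← pv_foldl_nested]
    simp only [List.foldl_map]
  have e1 : (PySem.List.pyRange 0 R 1).foldl (fun st r =>
      (PySem.List.pyRange 0 C 1).foldl (fun (st : Int × Int × Int) c =>
        if pvCellAt grid r c > st.1 then (pvCellAt grid r c, r, c) else st) st) (0, 0, 0) =
      (pvCells R C).foldl (pvStepA grid) (0, 0, 0) := hnest (pvStepA grid) (0, 0, 0)
  have eB : (PySem.List.pyRange 0 R 1).foldl (fun st r =>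
      (PySem.List.pyRange 0 C 1).foldl (fun (st : Int × Int × Int × List (Int × Int)) c =>
        let v := pvCellAt grid r c
        if v > st.1 then (v, r, c, [(r, c)])
        else if v = st.1 then (st.1, st.2.1, st.2.2.1, st.2.2.2 ++ [(r, c)])
        else st) st) (0, 0, 0, []) =
      ((pvCells R C).foldl (pvStepB grid) (0, 0, 0, ([] : List (Int × Int)))) :=
    hnest (pvStepB grid) (0, 0, 0, [])
  unfold solve solve_alt
  rw [e1, eB, pvStepB_rel grid (pvCells R C) 0 0 0 [] (by simp)]
  simp only [List.filter_nil, List.nil_append]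
  set m := (pvCells R C).foldl (pvStepA grid) (0, 0, 0) with hm
  have e2 : (PySem.List.pyRange 0 R 1).foldl (fun st r =>
      (PySem.List.pyRange 0 C 1).foldl (fun (st : Option Int × Bool) c =>
        if pvCellAt grid r c ≠ m.1 then st
        else if r = m.2.1 then st
        else (some c, if st.1.isSome ∧ st.1 ≠ some c then false else st.2)) st) (none, true) =
      (((pvCells R C).filter (fun p => decide (pvVal grid p = m.1 ∧ (fun q : Int × Int => q.1) p ≠ m.2.1))).map
        (fun p => p.2)).foldl pvUpd (none, true) := by
    refine Eq.trans (hnest (fun st p =>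
        if pvVal grid p ≠ m.1 then st
        else if p.1 = m.2.1 then st
        else (some p.2, if st.1.isSome ∧ st.1 ≠ some p.2 then false else st.2)) (none, true)) ?_
    exact pv_skipfold grid (pvCells R C) m.1 (fun p => p.2) (fun p => p.1) m.2.1 (none, true)
  have e3 : (PySem.List.pyRange 0 R 1).foldl (fun st r =>
      (PySem.List.pyRange 0 C 1).foldl (fun (st : Option Int × Bool) c =>
        if pvCellAt grid r c ≠ m.1 then st
        else if c = m.2.2 then st
        else (some r, if st.1.isSome ∧ st.1 ≠ some r then false else st.2)) st) (none, true) =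
      (((pvCells R C).filter (fun p => decide (pvVal grid p = m.1 ∧ (fun q : Int × Int => q.2) p ≠ m.2.2))).map
        (fun p => p.1)).foldl pvUpd (none, true) := by
    refine Eq.trans (hnest (fun st p =>
        if pvVal grid p ≠ m.1 then st
        else if p.2 = m.2.2 then st
        else (some p.1, if st.1.isSome ∧ st.1 ≠ some p.1 then false else st.2)) (none, true)) ?_
    exact pv_skipfold grid (pvCells R C) m.1 (fun p => p.1) (fun p => p.2) m.2.2 (none, true)
  rw [e2, e3, pv_filter_comp, pv_filter_comp]
  set L := (pvCells R C).filter (fun p => decide (pvVal grid p = m.1)) with hL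
  have h2 := pv_ok_iff_set ((L.filter (fun p => decide ((fun q : Int × Int => q.1) p ≠ m.2.1))).map (fun p => p.2))
  have h3 := pv_ok_iff_set ((L.filter (fun p => decide ((fun q : Int × Int => q.2) p ≠ m.2.2))).map (fun p => p.1))
  by_cases hc : (PySem.Set.ofList ((L.filter (fun p => decide ((fun q : Int × Int => q.1) p ≠ m.2.1))).map (fun p => p.2))).length ≤ 1
  · rw [h2.2 hc]
    simp only [if_true, if_pos hc]
  · rw [Bool.eq_false_iff.2 (fun h => hc (h2.1 h))]
    simp only [Bool.false_eq_true, if_false, if_neg hc]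
    by_cases hr : (PySem.Set.ofList ((L.filter (fun p => decide ((fun q : Int × Int => q.2) p ≠ m.2.2))).map (fun p => p.1))).length ≤ 1
    · rw [h3.2 hr]
      simp only [if_true, if_pos hr]
    · rw [Bool.eq_false_iff.2 (fun h => hr (h3.1 h))]
      simp only [Bool.false_eq_true, if_false, if_neg hr]

-- ===== VERDICT (by name: the statement is the Claim_ definition above) =====
theorem solve_spec : Claim_equal_solve := by
  intro R C grid _ _
  unfold Spec_solve
  exact pv_solve_eq R C grid
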